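-- pv_equiv track=rewrite | github.com/ncaminh/Dashboard | ULM/logic.py | get_unique_house_unit
-- ===== SOURCE A (Python) =====
-- def get_unique_house_unit(list_of_dict):
--     new_set = set()
--     count_none = 0
--     for dict in list_of_dict:
--         new_set.add(dict['house_unit'])
--
--     new_list = list(new_set)
--     new_list.sort()
--     return new_list
-- ===== SOURCE B (Python) =====
-- def get_unique_house_unit(list_of_dict):
--     vals = sorted(d['house_unit'] for d in list_of_dict)
--     out = []
--     for v in vals:
--         if not out or out[-1] != v:
--             out.append(v)
--     return out
-- ===== Notes on version B (the rewrite author's own statement) =====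
-- stated objective: alternative
-- what changed: B sorts the raw list of house_unit values first and then removes adjacent duplicates in one linear pass, instead of A's build-a-set-then-sort.
import Mathlib
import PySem

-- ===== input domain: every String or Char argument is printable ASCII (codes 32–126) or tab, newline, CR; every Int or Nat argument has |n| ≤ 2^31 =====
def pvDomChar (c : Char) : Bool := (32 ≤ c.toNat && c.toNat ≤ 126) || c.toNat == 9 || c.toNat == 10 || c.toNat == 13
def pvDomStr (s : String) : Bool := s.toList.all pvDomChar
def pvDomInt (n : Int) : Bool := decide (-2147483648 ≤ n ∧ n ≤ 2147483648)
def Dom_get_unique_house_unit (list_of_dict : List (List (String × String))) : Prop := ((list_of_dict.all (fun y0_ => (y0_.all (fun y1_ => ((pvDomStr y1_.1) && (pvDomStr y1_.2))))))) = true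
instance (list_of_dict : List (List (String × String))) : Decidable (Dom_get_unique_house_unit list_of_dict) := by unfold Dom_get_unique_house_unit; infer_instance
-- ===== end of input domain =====

-- B sorts all house_unit values first and then drops adjacent duplicates in one pass,
-- instead of A's build-a-set-then-sort (alternative decomposition, same asymptotic cost).

-- ===== PORT A =====
-- for dict in list_of_dict: new_set.add(dict['house_unit']); new_list = list(new_set); new_list.sort()
def get_unique_house_unit (list_of_dict : List (List (String × String))) : List String :=
  let new_set : PySem.Set String :=
    list_of_dict.foldl
      (fun s d => PySem.Set.add s ((PySem.Dict.mk d).getD "house_unit" "")) PySem.Set.empty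
  PySem.List.sorted new_set (fun x => x) false

-- ===== PORT B =====
-- vals = sorted(d['house_unit'] for d in list_of_dict); then keep v only when it differs from the last kept one
def get_unique_house_unit_alt (list_of_dict : List (List (String × String))) : List String :=
  let vals := PySem.List.sorted
    (list_of_dict.map (fun d => (PySem.Dict.mk d).getD "house_unit" "")) (fun x => x) false
  vals.foldl (fun out v => if out = [] ∨ out.getLast? ≠ some v then out ++ [v] else out) []

-- ===== PRECONDITION & SPEC =====
-- Pre_ excludes exactly the inputs where some dict lacks the key 'house_unit':
-- there Python A (and Python B alike) raises KeyError.
def Pre_get_unique_house_unit (list_of_dict : List (List (String × String))) : Prop :=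
  ∀ d ∈ list_of_dict, (PySem.Dict.mk d).contains "house_unit" = true
instance (list_of_dict : List (List (String × String))) : Decidable (Pre_get_unique_house_unit list_of_dict) := by unfold Pre_get_unique_house_unit; infer_instance

def pvWitness_get_unique_house_unit : (List (List (String × String))) :=
  [[("house_unit", "1A")], [("house_unit", "2B"), ("x", "y")], [("house_unit", "1A")]]

def Spec_get_unique_house_unit (list_of_dict : List (List (String × String))) (out : List String) : Prop := out = get_unique_house_unit_alt list_of_dict
instance (list_of_dict : List (List (String × String))) (out : List String) : Decidable (Spec_get_unique_house_unit list_of_dict out) := by unfold Spec_get_unique_house_unit; infer_instance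

-- ===== CLAIM (what is proved, stated in full; the proofs are below) =====
def Claim_equal_get_unique_house_unit : Prop := ∀ (list_of_dict : List (List (String × String))), Dom_get_unique_house_unit list_of_dict → Pre_get_unique_house_unit list_of_dict → Spec_get_unique_house_unit list_of_dict (get_unique_house_unit list_of_dict)

-- ===== LEMMAS AND PROOFS =====

-- in a strictly increasing list, the last element bounds every member
theorem last_is_max {l : List String} (h : l.Pairwise (· < ·)) {a w : String}
    (ha : a ∈ l) (hw : l.getLast? = some w) : a ≤ w := by
  induction l with
  | nil => cases ha
  | cons x t ih =>
    cases t with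
    | nil =>
      have hax : a = x := by simpa using ha
      have hxw : x = w := by simpa using hw
      simp [hax, hxw]
    | cons y t' =>
      have hw' : (y :: t').getLast? = some w := by
        simpa [List.getLast?_cons_cons] using hw
      have hwmem : w ∈ y :: t' := List.mem_of_getLast? hw'
      rcases List.mem_cons.mp ha with rfl | ha
      · exact le_of_lt ((List.pairwise_cons.mp h).1 w hwmem)
      · exact ih (List.pairwise_cons.mp h).2 ha hw'

-- invariant of B's dedup fold over a (≤)-sorted remainder
theorem dedup_fold_inv (vs : List String) :
    ∀ acc : List String, vs.Pairwise (· ≤ ·) → acc.Pairwise (· < ·) →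
    (∀ a ∈ acc, ∀ v ∈ vs, a ≤ v) →
    (vs.foldl (fun out v => if out = [] ∨ out.getLast? ≠ some v then out ++ [v] else out) acc).Pairwise (· < ·)
    ∧ ∀ x, (x ∈ vs.foldl (fun out v => if out = [] ∨ out.getLast? ≠ some v then out ++ [v] else out) acc
            ↔ x ∈ acc ∨ x ∈ vs) := by
  induction vs with
  | nil => intro acc _ hacc _; simpa using hacc
  | cons v vs ih =>
    intro acc hvs hacc hle
    simp only [List.foldl_cons]
    by_cases hc : acc = [] ∨ acc.getLast? ≠ some v
    · -- append v
      have hvle : ∀ w ∈ vs, v ≤ w := fun w hw => (List.pairwise_cons.mp hvs).1 w hw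
      have hacc' : (acc ++ [v]).Pairwise (· < ·) := by
        rw [List.pairwise_append]
        refine ⟨hacc, List.pairwise_singleton _ _, ?_⟩
        intro a ha b hb
        rw [List.mem_singleton] at hb
        subst b
        have hav : a ≤ v := hle a ha v (List.mem_cons_self)
        rcases hc with hc | hc
        · subst hc; cases ha
        · obtain ⟨w, hw⟩ := Option.isSome_iff_exists.mp (List.getLast?_isSome.mpr (List.ne_nil_of_mem ha))
          have hwv : w ≠ v := fun h => hc (h ▸ hw)
          have haw : a ≤ w := last_is_max hacc ha hw
          have hwle : w ≤ v := hle w (List.mem_of_getLast? hw) v (List.mem_cons_self)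
          exact lt_of_le_of_lt haw (lt_of_le_of_ne hwle hwv)
      have hle' : ∀ a ∈ acc ++ [v], ∀ w ∈ vs, a ≤ w := by
        intro a ha w hw
        rcases List.mem_append.mp ha with ha | ha
        · exact hle a ha w (List.mem_cons_of_mem _ hw)
        · simp at ha; subst ha; exact hvle w hw
      obtain ⟨h1, h2⟩ := ih (acc ++ [v]) (List.pairwise_cons.mp hvs).2 hacc' hle'
      refine ⟨by simpa [hc] using h1, fun x => ?_⟩
      have := h2 x
      simp only [if_pos hc] at *
      simp [List.mem_append] at this
      rw [this]; simp [List.mem_cons]; tauto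
    · -- skip: v equals the last kept element, so v ∈ acc
      push Not at hc
      obtain ⟨hne, hlast⟩ := hc
      have hvmem : v ∈ acc := List.mem_of_getLast? hlast
      have hle' : ∀ a ∈ acc, ∀ w ∈ vs, a ≤ w := fun a ha w hw =>
        hle a ha w (List.mem_cons_of_mem _ hw)
      obtain ⟨h1, h2⟩ := ih acc (List.pairwise_cons.mp hvs).2 hacc hle'
      have hcond : ¬ (acc = [] ∨ acc.getLast? ≠ some v) := by
        push Not; exact ⟨hne, hlast⟩
      refine ⟨by simpa [if_neg hcond] using h1, fun x => ?_⟩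
      have := h2 x
      rw [if_neg hcond]
      rw [this]
      constructor
      · rintro (h | h) <;> simp [List.mem_cons, h]
      · rintro (h | h)
        · exact Or.inl h
        · rcases List.mem_cons.mp h with h | h
          · exact Or.inl (h ▸ hvmem)
          · exact Or.inr h

-- ===== VERDICT (by name: the statement is the Claim_ definition above) =====
theorem get_unique_house_unit_spec : Claim_equal_get_unique_house_unit := by
  intro l _ _
  unfold Spec_get_unique_house_unit get_unique_house_unit get_unique_house_unit_alt
  set f : List (String × String) → String := fun d => (PySem.Dict.mk d).getD "house_unit" ""
  set vs : List String := l.map f with hvs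
  have hA : l.foldl (fun s d => PySem.Set.add s (f d)) PySem.Set.empty = PySem.Set.ofList vs := by
    rw [← PySem.Set.update_map_eq_foldl_add, ← hvs]
    exact PySem.Set.update_nil_left vs
  rw [hA]
  set sv := PySem.List.sorted vs (fun x => x) false with hsv
  have hsorted : sv.Pairwise (· ≤ ·) := by
    simpa using PySem.List.sorted_pairwise vs (fun x => x) (κ := String)
  obtain ⟨hlt, hmem⟩ := dedup_fold_inv sv [] hsorted (List.Pairwise.nil) (by simp)
  set r := sv.foldl (fun out v => if out = [] ∨ out.getLast? ≠ some v then out ++ [v] else out) [] with hr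
  have hnodup : r.Nodup := hlt.imp (fun h => ne_of_lt h)
  have hperm : r.Perm (PySem.Set.ofList vs) := by
    rw [List.perm_ext_iff_of_nodup hnodup (PySem.Set.nodup_ofList vs)]
    intro x
    rw [hmem x, PySem.Set.mem_ofList]
    simp [hsv, PySem.List.mem_sorted]
  exact PySem.List.sorted_eq_of_perm_of_pairwise_lt _ r (fun x => x) hperm hlt
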